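-- pv_equiv track=rewrite | github.com/DengShunChen/firewallTool | src/firewall_tool/viz/ip_compact.py | _runs_to_bracket_inner
-- ===== SOURCE A (Python) =====
-- from typing import Any, Dict, List, Sequence, Tuple
--
-- def _runs_to_bracket_inner(last_octets: Sequence[int]) -> str:
--     """
--     末位元組排序去重後濃縮為方括號內字串。
--
--     - 連續 3 個以上：`a-b`
--     - 連續 2 個：`a,b`（符合 172.16.90.[1,2]）
--     - 單一：`a`
--     """
--     nums = sorted(set(last_octets))
--     if not nums:
--         return ""
--     parts: List[str] = []
--     i = 0
--     while i < len(nums):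
--         start = nums[i]
--         j = i
--         while j + 1 < len(nums) and nums[j + 1] == nums[j] + 1:
--             j += 1
--         end = nums[j]
--         span = j - i + 1
--         if span == 1:
--             parts.append(str(start))
--         elif span == 2:
--             parts.append(f"{start},{end}")
--         else:
--             parts.append(f"{start}-{end}")
--         i = j + 1
--     return ",".join(parts)
-- ===== SOURCE B (Python) =====
-- def _runs_to_bracket_inner(last_octets):
--     s = set(last_octets)
--     if not s:
--         return ""
--
--     def fmt(a):
--         b = a
--         while b + 1 in s:
--             b += 1
--         if b == a:
--             return str(a)
--         if b == a + 1:
--             return f"{a},{b}"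
--         return f"{a}-{b}"
--
--     return ",".join(fmt(a) for a in sorted(v for v in s if v - 1 not in s))
-- ===== Notes on version B (the rewrite author's own statement) =====
-- stated objective: alternative
-- what changed: Replaces A's scan of the fully sorted deduplicated list with hash-set run detection: a value starts a run iff v-1 is not in the set, the run end is found by probing b+1 in the set, and only the run starts are sorted.
import Mathlib
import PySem

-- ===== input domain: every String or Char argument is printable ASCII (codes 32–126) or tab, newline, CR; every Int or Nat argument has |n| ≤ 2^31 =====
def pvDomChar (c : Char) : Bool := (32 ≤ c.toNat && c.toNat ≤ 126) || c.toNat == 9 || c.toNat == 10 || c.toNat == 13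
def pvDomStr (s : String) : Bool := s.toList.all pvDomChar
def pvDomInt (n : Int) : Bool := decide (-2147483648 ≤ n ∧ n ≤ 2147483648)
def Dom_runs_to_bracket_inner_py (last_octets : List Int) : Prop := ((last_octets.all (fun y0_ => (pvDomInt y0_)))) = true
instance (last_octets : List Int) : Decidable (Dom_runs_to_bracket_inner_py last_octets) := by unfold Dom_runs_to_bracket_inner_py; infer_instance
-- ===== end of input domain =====

-- B replaces A's scan of the fully sorted deduplicated list by set-membership run detection
-- (a value starts a run iff v-1 is not in the set; the run end is found by probing b+1
-- in the set; only the run starts are sorted); objective: alternative algorithm, same cost.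

-- ===== PORT A =====
-- f"{start}" / f"{start},{end}" / f"{start}-{end}" branches of A's loop body
def pvFmtA (start fin : Int) (span : Nat) : String :=
  if span = 1 then PySem.Int.toStr start
  else if span = 2 then PySem.Int.toStr start ++ "," ++ PySem.Int.toStr fin
  else PySem.Int.toStr start ++ "-" ++ PySem.Int.toStr fin

-- inner 'while j + 1 < len(nums) and nums[j + 1] == nums[j] + 1: j += 1'
-- (indices here are nonnegative and in range, so List.getD is exact for nums[j])
def pvFindJ (nums : List Int) (j : Nat) : Nat :=
  if j + 1 < nums.length ∧ nums.getD (j + 1) 0 = nums.getD j 0 + 1 then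
    pvFindJ nums (j + 1)
  else j
termination_by nums.length - j

theorem pvFindJ_ge (nums : List Int) (j : Nat) : j ≤ pvFindJ nums j := by
  induction j using pvFindJ.induct nums with
  | case1 j h ih => rw [pvFindJ, if_pos h]; omega
  | case2 j h => rw [pvFindJ, if_neg h]

-- outer 'while i < len(nums): … i = j + 1', accumulating parts
def pvLoopA (nums : List Int) (i : Nat) (parts : List String) : List String :=
  if i < nums.length then
    let start := nums.getD i 0
    let j := pvFindJ nums i
    let fin := nums.getD j 0
    let span := j - i + 1
    pvLoopA nums (j + 1) (parts ++ [pvFmtA start fin span])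
  else parts
termination_by nums.length - i
decreasing_by have := pvFindJ_ge nums i; omega

def runs_to_bracket_inner_py (last_octets : List Int) : String :=
  let nums := PySem.List.sorted (PySem.Set.ofList last_octets) (fun x => x) false
  if nums = [] then ""
  else PySem.Str.join "," (pvLoopA nums 0 [])

-- ===== PORT B =====
-- termination measure for the probing loop: the number of set elements above b shrinks
theorem pvWalk_measure (s : List Int) (b : Int) (h : (b + 1) ∈ s) :
    (s.filter (fun x => decide (b + 1 < x))).length
      < (s.filter (fun x => decide (b < x))).length := by
  have hmono : ∀ u : List Int,
      (u.filter (fun x => decide (b + 1 < x))).length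
        ≤ (u.filter (fun x => decide (b < x))).length := by
    intro u
    rw [← List.countP_eq_length_filter, ← List.countP_eq_length_filter]
    exact List.countP_mono_left (by intro x _ hx; simp at hx ⊢; omega)
  induction s with
  | nil => simp at h
  | cons y t ih =>
    by_cases hy : y = b + 1
    · subst hy
      have := hmono t
      simp only [List.filter_cons]
      simp
      omega
    · have ht : b + 1 ∈ t := by
        rcases List.mem_cons.1 h with h' | h'
        · exact absurd h'.symm hy
        · exact h'
      have := ih ht
      simp only [List.filter_cons]
      split_ifs with hA hB hB
      all_goals simp only [List.length_cons] at *
      · omega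
      · exfalso; simp at hA hB; omega
      · omega
      · omega

-- 'b = a; while b + 1 in s: b += 1' — probes successive values in the set
def pvWalk (s : List Int) (b : Int) : Int :=
  if (b + 1) ∈ s then pvWalk s (b + 1) else b
termination_by (s.filter (fun x => decide (b < x))).length
decreasing_by exact pvWalk_measure s b (by assumption)

-- the 'fmt' closure: format one run from its start
def pvFmtB (s : List Int) (a : Int) : String :=
  let b := pvWalk s a
  if b = a then PySem.Int.toStr a
  else if b = a + 1 then PySem.Int.toStr a ++ "," ++ PySem.Int.toStr b
  else PySem.Int.toStr a ++ "-" ++ PySem.Int.toStr b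

def runs_to_bracket_inner_py_alt (last_octets : List Int) : String :=
  let s := PySem.Set.ofList last_octets
  if s = [] then ""
  else
    let starts := PySem.List.sorted (s.filter (fun v => decide ((v - 1) ∉ s))) (fun x => x) false
    PySem.Str.join "," (starts.map (pvFmtB s))

-- ===== PRECONDITION & SPEC =====
def Spec_runs_to_bracket_inner_py (last_octets : List Int) (out : String) : Prop := out = runs_to_bracket_inner_py_alt last_octets
instance (last_octets : List Int) (out : String) : Decidable (Spec_runs_to_bracket_inner_py last_octets out) := by unfold Spec_runs_to_bracket_inner_py; infer_instance

-- ===== CLAIM (what is proved, stated in full; the proofs are below) =====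
def Claim_equal_runs_to_bracket_inner_py : Prop := ∀ (last_octets : List Int), Dom_runs_to_bracket_inner_py last_octets → Spec_runs_to_bracket_inner_py last_octets (runs_to_bracket_inner_py last_octets)

-- ===== LEMMAS AND PROOFS =====

-- splits off the first maximal consecutive run of a list (proof-side description of
-- A's inner look-ahead scan)
def pvChop : List Int → List Int × List Int
  | [] => ([], [])
  | [x] => ([x], [])
  | x :: y :: rest =>
    if y = x + 1 then
      let p := pvChop (y :: rest)
      (x :: p.1, p.2)
    else ([x], y :: rest)

theorem pvChop_snd_lt (x : Int) (r : List Int) :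
    (pvChop (x :: r)).2.length < (x :: r).length := by
  induction r generalizing x with
  | nil => simp [pvChop]
  | cons y rest ih =>
    by_cases h : y = x + 1
    · simpa [pvChop, h] using Nat.lt_succ_of_lt (ih y)
    · simp [pvChop, h]

-- the list of maximal consecutive runs
def pvRuns : List Int → List (List Int)
  | [] => []
  | x :: rest =>
    let p := pvChop (x :: rest)
    p.1 :: pvRuns p.2
termination_by xs => xs.length
decreasing_by exact pvChop_snd_lt x rest

-- a run's string from the group itself (A's loop body, seen through pvRuns)
def pvFmtG (g : List Int) : String :=
  if g.length = 1 then PySem.Int.toStr (g.headD 0)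
  else if g.length = 2 then PySem.Int.toStr (g.headD 0) ++ "," ++ PySem.Int.toStr (g.getLastD 0)
  else PySem.Int.toStr (g.headD 0) ++ "-" ++ PySem.Int.toStr (g.getLastD 0)

theorem pvChop_head_ne (x : Int) (r : List Int) :
    (pvChop (x :: r)).1.headD 0 = x ∧ (pvChop (x :: r)).1 ≠ [] := by
  cases r with
  | nil => simp [pvChop]
  | cons y rest => by_cases h : y = x + 1 <;> simp [pvChop, h]

theorem pvGetLastD_cons_of_ne_nil (a d : Int) (l : List Int) (h : l ≠ []) :
    (a :: l).getLastD d = l.getLastD d := by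
  cases l with
  | nil => exact absurd rfl h
  | cons x xs => simp

-- pvFindJ at i describes exactly the first chop of the suffix nums.drop i
theorem pvChop_find (nums : List Int) (i : Nat) (hi : i < nums.length) :
    pvFindJ nums i + 1 = i + (pvChop (nums.drop i)).1.length ∧
    (pvChop (nums.drop i)).2 = nums.drop (pvFindJ nums i + 1) ∧
    (pvChop (nums.drop i)).1.headD 0 = nums.getD i 0 ∧
    (pvChop (nums.drop i)).1.getLastD 0 = nums.getD (pvFindJ nums i) 0 := by
  induction i using pvFindJ.induct nums with
  | case1 j h ih =>
    have hj1 : j + 1 < nums.length := h.1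
    have hdj : nums.drop j = nums[j] :: nums.drop (j + 1) :=
      List.drop_eq_getElem_cons (by omega)
    have hdj1 : nums.drop (j + 1) = nums[j+1] :: nums.drop (j + 2) :=
      List.drop_eq_getElem_cons hj1
    have hkey : nums[j+1] = nums[j] + 1 := by
      have := h.2
      rwa [List.getD_eq_getElem _ _ hj1, List.getD_eq_getElem _ _ (by omega)] at this
    have hchop : pvChop (nums.drop j) =
        (nums[j] :: (pvChop (nums.drop (j+1))).1, (pvChop (nums.drop (j+1))).2) := by
      rw [hdj, hdj1, pvChop, if_pos hkey, ← hdj1]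
    obtain ⟨ih1, ih2, ih3, ih4⟩ := ih hj1
    have hne := (pvChop_head_ne nums[j+1] (nums.drop (j+2))).2
    rw [← hdj1] at hne
    rw [pvFindJ, if_pos h, hchop]
    refine ⟨by simp; omega, by simpa using ih2, ?_, ?_⟩
    · simp [List.getElem?_eq_getElem (show j < nums.length by omega)]
    · rw [pvGetLastD_cons_of_ne_nil _ _ _ hne]
      exact ih4
  | case2 j h =>
    rw [pvFindJ, if_neg h]
    have hdj : nums.drop j = nums[j] :: nums.drop (j + 1) :=
      List.drop_eq_getElem_cons hi
    by_cases hj1 : j + 1 < nums.length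
    · have hkey : ¬ nums[j+1] = nums[j] + 1 := by
        intro hk
        exact h ⟨hj1, by rw [List.getD_eq_getElem _ _ hj1, List.getD_eq_getElem _ _ hi]; exact hk⟩
      have hdj1 : nums.drop (j + 1) = nums[j+1] :: nums.drop (j + 2) :=
        List.drop_eq_getElem_cons hj1
      rw [hdj, hdj1, pvChop, if_neg hkey, ← hdj1]
      refine ⟨by simp, rfl, ?_, ?_⟩ <;>
        simp [List.getElem?_eq_getElem hi]
    · have hlen : nums.length = j + 1 := by omega
      have hdrop : nums.drop (j + 1) = [] := List.drop_eq_nil_of_le (by omega)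
      rw [hdj, hdrop, pvChop]
      refine ⟨by simp, by simp, ?_, ?_⟩ <;>
        simp [List.getElem?_eq_getElem hi]

theorem pvFmt_eq (g : List Int) (s e : Int) (span : Nat)
    (hs : g.headD 0 = s) (he : g.getLastD 0 = e) (hl : g.length = span) :
    pvFmtG g = pvFmtA s e span := by
  subst hs he hl; rfl

theorem pvLoopA_eq (nums : List Int) (i : Nat) (parts : List String) :
    pvLoopA nums i parts = parts ++ (pvRuns (nums.drop i)).map pvFmtG := by
  induction i, parts using pvLoopA.induct nums with
  | case1 i parts hi start j fin span ih =>
    have hge := pvFindJ_ge nums i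
    obtain ⟨h1, h2, h3, h4⟩ := pvChop_find nums i hi
    have hdi : nums.drop i = nums.getD i 0 :: nums.drop (i + 1) := by
      rw [List.drop_eq_getElem_cons hi, List.getD_eq_getElem _ _ hi]
    rw [pvLoopA, if_pos hi, ih]
    conv_rhs => rw [hdi, pvRuns]
    simp only [← hdi, List.map_cons, h2]
    rw [pvFmt_eq _ (nums.getD i 0) (nums.getD (pvFindJ nums i) 0) (pvFindJ nums i - i + 1)
      h3 h4 (by omega), List.append_cons]
    simp only [List.append_nil, List.append_assoc, List.singleton_append]
    rfl
  | case2 i parts hi =>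
    rw [pvLoopA, if_neg hi]
    have : nums.drop i = [] := List.drop_eq_nil_of_le (by omega)
    simp [this, pvRuns]

-- [a, a+1, …, a+n] — the shape of a maximal run
def pvConsec : Int → Nat → List Int
  | a, 0 => [a]
  | a, n + 1 => a :: pvConsec (a + 1) n

theorem pvConsec_ne_nil (a : Int) (n : Nat) : pvConsec a n ≠ [] := by
  cases n <;> simp [pvConsec]

theorem pvConsec_headD (a : Int) (n : Nat) : (pvConsec a n).headD 0 = a := by
  cases n <;> simp [pvConsec]

theorem pvConsec_length (a : Int) (n : Nat) : (pvConsec a n).length = n + 1 := by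
  induction n generalizing a with
  | zero => rfl
  | succ m ih => simp [pvConsec, ih]

theorem pvConsec_getLastD (a : Int) (n : Nat) : (pvConsec a n).getLastD 0 = a + n := by
  induction n generalizing a with
  | zero => simp [pvConsec]
  | succ m ih =>
    rw [pvConsec, pvGetLastD_cons_of_ne_nil _ _ _ (pvConsec_ne_nil _ _), ih]
    push_cast; ring

theorem pvMem_consec (v a : Int) (n : Nat) : v ∈ pvConsec a n ↔ a ≤ v ∧ v ≤ a + n := by
  induction n generalizing a with
  | zero => simp [pvConsec]; omega
  | succ m ih =>
    simp only [pvConsec, List.mem_cons, ih]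
    push_cast
    omega

-- pvChop of a strictly increasing list is a consecutive prefix plus a gap
theorem pvChop_spec (x : Int) (r : List Int) (hp : (x :: r).Pairwise (· < ·)) :
    ∃ n : Nat, (pvChop (x :: r)).1 = pvConsec x n ∧
      x :: r = pvConsec x n ++ (pvChop (x :: r)).2 ∧
      ∀ h, (pvChop (x :: r)).2.head? = some h → x + n + 2 ≤ h := by
  induction r generalizing x with
  | nil => exact ⟨0, by simp [pvChop, pvConsec]⟩
  | cons y rest ih =>
    by_cases h : y = x + 1
    · have hch : pvChop (x :: y :: rest) = (x :: (pvChop (y :: rest)).1, (pvChop (y :: rest)).2) := by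
        rw [pvChop, if_pos h]
      obtain ⟨n, hc1, hsp, hbd⟩ := ih y hp.of_cons
      refine ⟨n + 1, ?_, ?_, ?_⟩
      · rw [hch]; simp only [pvConsec, ← h, hc1]
      · rw [hch]; simp only [pvConsec, ← h]
        rw [List.cons_append, ← hsp]
      · intro z hz
        rw [hch] at hz
        have := hbd z hz
        push_cast
        omega
    · have hch : pvChop (x :: y :: rest) = ([x], y :: rest) := by
        rw [pvChop, if_neg h]
      have hxy : x < y := (List.pairwise_cons.1 hp).1 y (by simp)
      refine ⟨0, by rw [hch]; rfl, by rw [hch]; rfl, ?_⟩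
      intro z hz
      rw [hch] at hz
      simp only [List.head?_cons, Option.some.injEq] at hz
      omega

-- the membership walk computes the run end
theorem pvWalk_eq (s : List Int) (a : Int) (n : Nat)
    (hin : ∀ k : Nat, 1 ≤ k → k ≤ n → a + (k : Int) ∈ s)
    (hout : a + (n : Int) + 1 ∉ s) :
    pvWalk s a = a + n := by
  induction n generalizing a with
  | zero => rw [pvWalk, if_neg (by simpa using hout)]; simp
  | succ m ih =>
    have h1 : a + 1 ∈ s := by simpa using hin 1 (by omega) (by omega)
    rw [pvWalk, if_pos h1]
    have hrec := ih (a + 1)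
      (fun k hk1 hk2 => by
        have h3 := hin (k + 1) (by omega) (by omega)
        have he : a + 1 + (k : Int) = a + ((k : Int) + 1) := by ring
        rw [he]; exact_mod_cast h3)
      (by
        have he : a + 1 + (m : Int) + 1 = a + ((m : Int) + 1) + 1 := by ring
        rw [he]; exact_mod_cast hout)
    rw [hrec]; push_cast; ring

theorem pvFilter_consec (p : Int → Bool) (a : Int) (n : Nat) (hpa : p a = true)
    (hrest : ∀ v, v ∈ pvConsec a n → v ≠ a → p v = false) :
    (pvConsec a n).filter p = [a] := by
  cases n with
  | zero => simp [pvConsec, hpa]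
  | succ m =>
    rw [pvConsec, List.filter_cons_of_pos hpa]
    congr 1
    rw [List.filter_eq_nil_iff]
    intro v hv
    have hm := (pvMem_consec v (a + 1) m).1 hv
    have : v ∈ pvConsec a (m + 1) := by
      rw [pvMem_consec]; push_cast; omega
    simp [hrest v this (by omega)]

theorem pvFmtG_consec (s : List Int) (a : Int) (n : Nat) (hw : pvWalk s a = a + n) :
    pvFmtG (pvConsec a n) = pvFmtB s a := by
  simp only [pvFmtG, pvFmtB, hw, pvConsec_length, pvConsec_headD, pvConsec_getLastD]
  rcases n with _ | _ | m
  · norm_num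
  · norm_num
  · push_cast
    norm_num
    rw [if_neg (show ¬((m : Int) + 1 + 1 = 0) by omega),
        if_neg (show ¬((m : Int) + 1 = 0) by omega)]

-- main bridge: A's runs of the sorted list vs B's set-probing over run starts
theorem pvRuns_eq (s : List Int) (L : List Int) (hp : L.Pairwise (· < ·))
    (lo : Int) (hlo : ∀ v ∈ L, lo ≤ v - 1)
    (hS : ∀ x : Int, lo ≤ x → (x ∈ s ↔ x ∈ L)) :
    (pvRuns L).map pvFmtG
      = (L.filter (fun v => decide ((v - 1) ∉ s))).map (pvFmtB s) := by
  match L, hp with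
  | [], _ => simp [pvRuns]
  | x :: r, hp =>
    obtain ⟨n, hc1, hsp, hbd⟩ := pvChop_spec x r hp
    have hlox : lo ≤ x - 1 := hlo x (by simp)
    have hmemL : ∀ v, v ∈ (x :: r) ↔ v ∈ pvConsec x n ∨ v ∈ (pvChop (x :: r)).2 := by
      intro v
      conv_lhs => rw [hsp]
      simp
    have hc2all : ∀ v ∈ (pvChop (x :: r)).2, x + n + 2 ≤ v := by
      have hpc2 : (pvChop (x :: r)).2.Pairwise (· < ·) :=
        ((List.pairwise_append.1 (hsp ▸ hp)).2).1
      intro v hv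
      cases hc2 : (pvChop (x :: r)).2 with
      | nil => simp [hc2] at hv
      | cons h t =>
        have hh := hbd h (by simp [hc2])
        rw [hc2] at hv hpc2
        rcases List.mem_cons.1 hv with rfl | hvt
        · exact hh
        · have := (List.pairwise_cons.1 hpc2).1 v hvt
          omega
    -- the filter over the first run keeps exactly its start
    have hfilter1 : (pvConsec x n).filter (fun v => decide ((v - 1) ∉ s)) = [x] := by
      apply pvFilter_consec
      · simp only [decide_eq_true_eq]
        intro hmem
        have := (hS (x - 1) (by omega)).1 hmem
        rw [hmemL, pvMem_consec] at this
        rcases this with h1 | h1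
        · omega
        · have := hc2all _ h1; omega
      · intro v hv hne
        have hvmem := (pvMem_consec v x n).1 hv
        have : v - 1 ∈ pvConsec x n := by rw [pvMem_consec]; omega
        have : v - 1 ∈ s := (hS (v - 1) (by omega)).2 ((hmemL (v - 1)).2 (Or.inl this))
        simp [this]
    have hwalk : pvWalk s x = x + n := by
      apply pvWalk_eq
      · intro k hk1 hk2
        have hmem : x + (k : Int) ∈ pvConsec x n := by rw [pvMem_consec]; omega
        exact (hS (x + k) (by omega)).2 ((hmemL _).2 (Or.inl hmem))
      · intro hmem
        have := (hS (x + n + 1) (by omega)).1 hmem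
        rw [hmemL, pvMem_consec] at this
        rcases this with h1 | h1
        · omega
        · have := hc2all _ h1; omega
    rw [pvRuns]
    simp only [hc1, List.map_cons]
    conv_rhs => rw [hsp]
    rw [List.filter_append, hfilter1]
    simp only [List.singleton_append, List.map_cons]
    rw [pvFmtG_consec s x n hwalk]
    congr 1
    have hpc2 : (pvChop (x :: r)).2.Pairwise (· < ·) :=
      ((List.pairwise_append.1 (hsp ▸ hp)).2).1
    exact pvRuns_eq s (pvChop (x :: r)).2 hpc2 (x + n + 1)
      (fun v hv => by have := hc2all v hv; omega)
      (fun y hy => by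
        rw [hS y (by omega), hmemL, pvMem_consec]
        constructor
        · rintro (h1 | h1)
          · omega
          · exact h1
        · exact Or.inr)
termination_by L.length
decreasing_by exact pvChop_snd_lt x r

-- ===== VERDICT (by name: the statement is the Claim_ definition above) =====
theorem runs_to_bracket_inner_py_spec : Claim_equal_runs_to_bracket_inner_py := by
  intro xs _
  unfold Spec_runs_to_bracket_inner_py runs_to_bracket_inner_py runs_to_bracket_inner_py_alt
  simp only
  set s := PySem.Set.ofList xs with hs
  set nums := PySem.List.sorted s (fun x => x) false with hnums
  by_cases hnil : s = []
  · rw [if_pos hnil, if_pos (by rw [hnums, PySem.List.sorted_eq_nil_iff]; exact hnil)]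
  · have hnnil : nums ≠ [] := by
      rw [hnums, Ne, PySem.List.sorted_eq_nil_iff]; exact hnil
    rw [if_neg hnil, if_neg hnnil]
    have hperm : nums.Perm s := PySem.List.sorted_perm ..
    have hpair : nums.Pairwise (· < ·) := PySem.List.sorted_ofList_pairwise_lt ..
    -- sorting the filtered set is filtering the sorted set
    have hfs : PySem.List.sorted (s.filter (fun v => decide ((v - 1) ∉ s))) (fun x => x) false
        = nums.filter (fun v => decide ((v - 1) ∉ s)) :=
      PySem.List.sorted_eq_of_perm_of_pairwise_lt _ _ _
        (hperm.filter _) (hpair.sublist List.filter_sublist)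
    rw [hfs, pvLoopA_eq nums 0 []]
    simp only [List.drop_zero, List.nil_append]
    congr 1
    obtain ⟨m, t, hmt⟩ : ∃ m t, nums = m :: t := by
      cases hn : nums with
      | nil => exact absurd hn hnnil
      | cons m t => exact ⟨m, t, rfl⟩
    have hsorted : PySem.List.sorted s (fun x => x) false = m :: t := by
      rw [← hnums]; exact hmt
    have hmin : ∀ v ∈ nums, m ≤ v := fun v hv =>
      PySem.List.key_head_sorted_le _ _ hsorted v (hperm.mem_iff.1 hv)
    exact pvRuns_eq s nums hpair (m - 1)
      (fun v hv => by have := hmin v hv; omega)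
      (fun y _ => by rw [hperm.mem_iff])
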